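-- pv_equiv track=rewrite | github.com/SATYAKRISHNAVINJAMURI/fp_growth | fp_growth.py | del_infrequent
-- ===== SOURCE A (Python) =====
-- def del_infrequent(conditional_pattern_base,minsup):
--     '''
--     From the conditional pattern base, support count of all items is calculated and items with less support are removed.
--     This is an enhancing the conditional Pattern Base before building Tree.
--     Because of this conditional patterns are modified such that node with high support appears first just to
--     satisfy the property of FP Tree.
--     '''
--     result = {}
--     for key,values in conditional_pattern_base.items():
--         item_support = {}
--         for ttuple in values:
--             itemset = ttuple[0]
--             counter = ttuple[1]
--             for item in itemset:
--                 if item in item_support.keys():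
--                     item_support[item] += counter
--                 else:
--                     item_support[item] = counter
--         item_support = dict(sorted(item_support.items(), key=lambda x: x[1],reverse = True))
--         itemslist = list(item_support.keys())
--         for tkey ,tvalue in item_support.items():
--             if(tvalue < minsup):
--                 itemslist.remove(tkey)
--         patterns = []
--         for qtuple in values:
--             item_list = list(qtuple[0])
--             counter = qtuple[1]
--             new_list = []
--             for k in itemslist:
--                 if k in item_list:
--                     new_list.append(k)
--             patterns.append((tuple(new_list),counter))
--         result[key] = patterns
--     return result
-- ===== SOURCE B (Python) =====
-- def del_infrequent(conditional_pattern_base, minsup):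
--     result = {}
--     for key, values in conditional_pattern_base.items():
--         support = {}
--         for itemset, counter in values:
--             for item in itemset:
--                 support[item] = support.get(item, 0) + counter
--         frequent = [it for it, s in sorted(support.items(), key=lambda kv: kv[1], reverse=True) if s >= minsup]
--         rank = {it: i for i, it in enumerate(frequent)}
--         result[key] = [(tuple(sorted({it for it in itemset if it in rank}, key=lambda it: rank[it])), counter)
--                        for itemset, counter in values]
--     return result
-- ===== Notes on version B (the rewrite author's own statement) =====
-- stated objective: alternative
-- what changed: Per key, A prunes a copy of the sorted key list with repeated list.remove scans and then, for every pattern, scans the whole frequent list testing membership in the pattern; B builds the frequent list by one filter of the sorted support items, precomputes a rank dictionary, and produces each pattern by filtering its own distinct items through the rank dict and sorting them by rank.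
import Mathlib
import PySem

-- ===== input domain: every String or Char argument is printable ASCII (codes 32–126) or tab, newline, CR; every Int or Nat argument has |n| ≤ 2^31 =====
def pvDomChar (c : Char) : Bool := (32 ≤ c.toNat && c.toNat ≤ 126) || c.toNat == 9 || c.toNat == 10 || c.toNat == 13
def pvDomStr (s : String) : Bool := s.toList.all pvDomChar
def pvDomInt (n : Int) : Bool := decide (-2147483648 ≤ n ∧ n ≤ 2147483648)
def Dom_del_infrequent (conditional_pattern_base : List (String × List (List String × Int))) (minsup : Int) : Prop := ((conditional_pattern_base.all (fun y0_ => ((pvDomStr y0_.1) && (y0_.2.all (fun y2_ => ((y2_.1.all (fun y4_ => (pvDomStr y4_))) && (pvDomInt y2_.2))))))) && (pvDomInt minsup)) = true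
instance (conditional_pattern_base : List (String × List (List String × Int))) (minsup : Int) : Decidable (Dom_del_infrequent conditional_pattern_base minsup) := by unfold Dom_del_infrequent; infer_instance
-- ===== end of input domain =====

-- B replaces A's per-key remove-loop and per-pattern scans over the frequent list by a
-- support-rank dictionary and a per-pattern filter+sort of its distinct items (objective: alternative).


-- ===== PORT A =====
-- A's item_support accumulation loop ('if item in item_support.keys(): += counter else: = counter')
def pyASupport (values : List (List String × Int)) : PySem.Dict String Int :=
  values.foldl (fun sup t =>
    t.1.foldl (fun sup item =>
      if sup.contains item then sup.insert item (sup.getD item 0 + t.2)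
      else sup.insert item t.2) sup) PySem.Dict.empty

-- A's per-key body: sort items by support (desc, stable), itemslist.remove for the infrequent ones,
-- then per pattern append the surviving items in itemslist order.
-- 'itemslist.remove(tkey)' raises ValueError only when tkey is absent, which cannot happen here
-- (dict keys are unique), so the '.getD l' default is unreachable.
def pyAPatterns (minsup : Int) (kv : String × List (List String × Int)) : List (List String × Int) :=
  let itemSupport := PySem.Dict.ofList (PySem.List.sorted (pyASupport kv.2).items (fun x => x.2) true)
  let itemslist := itemSupport.items.foldl
    (fun l p => if p.2 < minsup then (PySem.List.remove? l p.1).getD l else l) itemSupport.keys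
  kv.2.foldl (fun ps q =>
    ps ++ [((itemslist.foldl (fun nl k => if q.1.contains k then nl ++ [k] else nl) []), q.2)]) []

def del_infrequent (conditional_pattern_base : List (String × List (List String × Int))) (minsup : Int) : List (String × List (List String × Int)) :=
  ((PySem.Dict.ofList conditional_pattern_base).items.foldl
    (fun res kv => res.insert kv.1 (pyAPatterns minsup kv)) PySem.Dict.empty).items

-- ===== PORT B =====
-- support[item] = support.get(item, 0) + counter
def pyBSupport (values : List (List String × Int)) : PySem.Dict String Int :=
  values.foldl (fun sup t =>
    t.1.foldl (fun sup item => sup.modify item 0 (· + t.2)) sup) PySem.Dict.empty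

-- rank = {it: i for i, it in enumerate(frequent)}
def pyBRank (frequent : List String) : PySem.Dict String Int :=
  (PySem.List.enumerate frequent).foldl (fun d p => d.insert p.2 p.1) PySem.Dict.empty

-- B's per-key body: frequent = items with support >= minsup in sorted-support order; per pattern
-- sort its distinct frequent items by rank ('rank[it]' is exact as getD since every sorted item is
-- a rank key, and the set feeds sorted under an injective key, so the set's order cannot matter).
def pyBPatterns (minsup : Int) (kv : String × List (List String × Int)) : List (List String × Int) :=
  let frequent := ((PySem.List.sorted (pyBSupport kv.2).items (fun x => x.2) true).filter
      (fun p => minsup ≤ p.2)).map (fun p => p.1)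
  let rank := pyBRank frequent
  kv.2.map (fun q =>
    (PySem.List.sorted (PySem.Set.ofList (q.1.filter (fun it => rank.contains it)))
      (fun it => rank.getD it 0) false, q.2))

def del_infrequent_alt (conditional_pattern_base : List (String × List (List String × Int))) (minsup : Int) : List (String × List (List String × Int)) :=
  (PySem.Dict.ofList conditional_pattern_base).items.map (fun kv => (kv.1, pyBPatterns minsup kv))

-- ===== PRECONDITION & SPEC =====
def Spec_del_infrequent (conditional_pattern_base : List (String × List (List String × Int))) (minsup : Int) (out : List (String × List (List String × Int))) : Prop := out = del_infrequent_alt conditional_pattern_base minsup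
instance (conditional_pattern_base : List (String × List (List String × Int))) (minsup : Int) (out : List (String × List (List String × Int))) : Decidable (Spec_del_infrequent conditional_pattern_base minsup out) := by unfold Spec_del_infrequent; infer_instance

-- ===== CLAIM (what is proved, stated in full; the proofs are below) =====
def Claim_equal_del_infrequent : Prop := ∀ (conditional_pattern_base : List (String × List (List String × Int))) (minsup : Int), Dom_del_infrequent conditional_pattern_base minsup → Spec_del_infrequent conditional_pattern_base minsup (del_infrequent conditional_pattern_base minsup)

-- ===== LEMMAS AND PROOFS =====

-- A's support-building step is exactly B's dict.modify step.
theorem support_step_eq (d : PySem.Dict String Int) (k : String) (c : Int) :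
    (if d.contains k then d.insert k (d.getD k 0 + c) else d.insert k c) = d.modify k 0 (· + c) := by
  unfold PySem.Dict.modify
  by_cases h : d.contains k = true
  · simp [h]
  · have h0 : d.getD k 0 = 0 := by
      simp [PySem.Dict.getD, (PySem.Dict.get?_eq_none_iff_contains d k).2 (by simpa using h)]
    simp [h, h0]

theorem support_eq (values : List (List String × Int)) : pyASupport values = pyBSupport values := by
  unfold pyASupport pyBSupport
  apply PySem.List.foldl_congr_mem
  intro acc t _
  apply PySem.List.foldl_congr_mem
  intro acc item _
  exact support_step_eq acc item t.2

theorem nodup_keys_support (values : List (List String × Int)) : (pyBSupport values).keys.Nodup := by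
  unfold pyBSupport
  have inner : ∀ (c : Int) (l : List String) (d : PySem.Dict String Int), d.keys.Nodup →
      (l.foldl (fun sup item => sup.modify item 0 (· + c)) d).keys.Nodup := by
    intro c l
    induction l with
    | nil => exact fun d h => h
    | cons x t ih => exact fun d h => ih _ (PySem.Dict.nodup_keys_insert d x _ h)
  have outer : ∀ (vs : List (List String × Int)) (d : PySem.Dict String Int), d.keys.Nodup →
      (vs.foldl (fun sup t => t.1.foldl (fun sup item => sup.modify item 0 (· + t.2)) sup) d).keys.Nodup := by
    intro vs
    induction vs with
    | nil => exact fun d h => h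
    | cons v t ih => exact fun d h => ih _ (inner v.2 v.1 d h)
  exact outer values PySem.Dict.empty PySem.Dict.nodup_keys_empty

-- dict(pairs) with distinct keys keeps exactly that pairs list
theorem items_ofList_of_nodup (L : List (String × Int)) (h : (L.map (fun p => p.1)).Nodup) :
    (PySem.Dict.ofList L).items = L := by
  have := PySem.Dict.items_foldl_insert_fresh L (fun p => p.1) (fun p => p.2)
      PySem.Dict.empty (fun a _ => PySem.Dict.contains_empty _) h
  simpa [PySem.Dict.ofList, PySem.Dict.update, PySem.Dict.empty] using this

theorem remove?_append_not_mem (P T : List String) (a : String) (ha : a ∉ P) :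
    PySem.List.remove? (P ++ a :: T) a = some (P ++ T) := by
  induction P with
  | nil => simp [PySem.List.remove?_cons_self]
  | cons x xs ih =>
    have hx : x ≠ a := by rintro rfl; exact ha (List.mem_cons_self)
    have := ih (fun h => ha (List.mem_cons_of_mem _ h))
    simp [PySem.List.remove?_cons_of_ne _ hx, this]

-- the itemslist.remove loop keeps, in order, exactly the first components with support ≥ minsup
theorem remove_loop (minsup : Int) (L : List (String × Int)) (P : List String)
    (hP : ∀ p ∈ L, p.1 ∉ P) (h : (L.map (fun p => p.1)).Nodup) :
    L.foldl (fun l p => if p.2 < minsup then (PySem.List.remove? l p.1).getD l else l)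
      (P ++ L.map (fun p => p.1))
    = P ++ (L.filter (fun p => !decide (p.2 < minsup))).map (fun p => p.1) := by
  induction L generalizing P with
  | nil => simp
  | cons q T ih =>
    simp only [List.map_cons, List.foldl_cons]
    have hq : q.1 ∉ P := hP q (List.mem_cons_self)
    have hT : ∀ p ∈ T, p.1 ∉ P ++ [q.1] := by
      intro p hp
      simp only [List.mem_append, List.mem_singleton]
      rintro (hc | hc)
      · exact hP p (List.mem_cons_of_mem _ hp) hc
      · have := (List.nodup_cons.mp h).1
        exact this (by show q.1 ∈ _; rw [← hc]; exact List.mem_map_of_mem hp)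
    have hT' := (List.nodup_cons.mp h).2
    by_cases hlt : q.2 < minsup
    · rw [if_pos hlt, remove?_append_not_mem P (T.map (fun p => p.1)) q.1 hq]
      have := ih (P := P) (fun p hp hc => hP p (List.mem_cons_of_mem _ hp) hc) hT'
      simp only [Option.getD_some]
      rw [this, List.filter_cons_of_neg (by simpa using hlt)]
    · rw [if_neg hlt]
      have : P ++ q.1 :: T.map (fun p => p.1) = (P ++ [q.1]) ++ T.map (fun p => p.1) := by simp
      rw [this, ih (P := P ++ [q.1]) hT hT', List.filter_cons_of_pos (by simpa using hlt)]
      simp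

theorem rank_items (F : List String) (hF : F.Nodup) :
    (pyBRank F).items = (PySem.List.enumerate F).map (fun p => (p.2, p.1)) := by
  have := PySem.Dict.items_foldl_insert_fresh (PySem.List.enumerate F) (fun p => p.2) (fun p => p.1)
      PySem.Dict.empty (fun a _ => PySem.Dict.contains_empty _)
      (by rw [PySem.List.map_snd_enumerate]; exact hF)
  simpa [pyBRank, PySem.Dict.empty] using this

theorem rank_keys (F : List String) (hF : F.Nodup) : (pyBRank F).keys = F := by
  show (pyBRank F).items.map (fun p => p.1) = F
  rw [rank_items F hF, List.map_map]
  exact PySem.List.map_snd_enumerate F 0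

theorem rank_getD (F : List String) (hF : F.Nodup) (i : Nat) (hi : i < F.length) :
    (pyBRank F).getD F[i] 0 = (i : Int) := by
  have hk : (pyBRank F).keys.Nodup := by rw [rank_keys F hF]; exact hF
  apply PySem.Dict.getD_of_mem_items _ _ hk
  rw [rank_items F hF]
  have hlen : i < (PySem.List.enumerate F 0).length := by
    rw [PySem.List.length_enumerate]; exact hi
  have hmem : (PySem.List.enumerate F 0)[i] ∈ PySem.List.enumerate F 0 := List.getElem_mem hlen
  rw [PySem.List.getElem_enumerate F 0 i hlen] at hmem
  simpa using List.mem_map_of_mem (f := fun p => (p.2, p.1)) hmem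

theorem rank_pairwise (F : List String) (hF : F.Nodup) :
    F.Pairwise (fun a b => (pyBRank F).getD a 0 < (pyBRank F).getD b 0) := by
  rw [List.pairwise_iff_getElem]
  intro i j hi hj hij
  rw [rank_getD F hF i hi, rank_getD F hF j hj]
  exact_mod_cast hij

-- filtering the frequent list F equals sorting a pattern's distinct frequent items by rank
theorem pattern_eq (F : List String) (hF : F.Nodup) (xs : List String) :
    PySem.List.sorted (PySem.Set.ofList (xs.filter (fun it => (pyBRank F).contains it)))
      (fun it => (pyBRank F).getD it 0) false
    = F.filter (fun k => xs.contains k) := by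
  apply PySem.List.sorted_eq_of_perm_of_pairwise_lt
  · rw [List.perm_ext_iff_of_nodup (List.Nodup.filter _ hF) (PySem.Set.nodup_ofList _)]
    intro a
    have hcont : ∀ it : String, (pyBRank F).contains it = decide (it ∈ F) := by
      intro it
      rw [PySem.Dict.contains_eq_decide_mem_keys, rank_keys F hF]
    simp [PySem.Set.mem_ofList, List.mem_filter, hcont, and_comm]
  · exact List.Pairwise.sublist List.filter_sublist (rank_pairwise F hF)

theorem patterns_eq (minsup : Int) (kv : String × List (List String × Int)) :
    pyAPatterns minsup kv = pyBPatterns minsup kv := by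
  simp only [pyAPatterns, pyBPatterns]
  rw [support_eq]
  set L := PySem.List.sorted (pyBSupport kv.2).items (fun x => x.2) true with hL
  have hnodup : (L.map (fun p => p.1)).Nodup := by
    have hperm : (L.map (fun p => p.1)).Perm ((pyBSupport kv.2).items.map (fun p => p.1)) :=
      (PySem.List.sorted_perm _ _ _).map _
    exact hperm.nodup_iff.mpr (nodup_keys_support kv.2)
  have hitems : (PySem.Dict.ofList L).items = L := items_ofList_of_nodup L hnodup
  have hkeys : (PySem.Dict.ofList L).keys = L.map (fun p => p.1) := by
    show (PySem.Dict.ofList L).items.map (fun p => p.1) = _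
    rw [hitems]
  rw [hitems, hkeys]
  rw [show L.map (fun p => p.1) = [] ++ L.map (fun p => p.1) from rfl,
      remove_loop minsup L [] (by simp) hnodup]
  have hfilter : (fun p : String × Int => !decide (p.2 < minsup)) = (fun p => decide (minsup ≤ p.2)) := by
    funext p
    rw [← decide_not]
    simp [not_lt]
  rw [List.nil_append, hfilter]
  set F := (L.filter (fun p => decide (minsup ≤ p.2))).map (fun p => p.1) with hF
  have hFnodup : F.Nodup := by
    have hsub : F.Sublist (L.map (fun p => p.1)) := by
      exact (List.filter_sublist (l := L)).map (fun p => p.1)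
    exact hsub.nodup hnodup
  have hmap := PySem.List.foldl_append_singleton_eq_map
    (f := fun q : List String × Int =>
      (List.foldl (fun nl k => if q.1.contains k then nl ++ [k] else nl) [] F, q.2))
    (l := kv.2) (acc := [])
  rw [hmap, List.nil_append]
  apply List.map_congr_left
  intro q _
  rw [PySem.List.foldl_append_if_eq_filter (fun k => q.1.contains k) F []]
  rw [List.nil_append, pattern_eq F hFnodup q.1]

-- ===== VERDICT (by name: the statement is the Claim_ definition above) =====
theorem del_infrequent_spec : Claim_equal_del_infrequent := by
  intro cpb minsup _
  unfold Spec_del_infrequent del_infrequent del_infrequent_alt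
  rw [PySem.Dict.items_foldl_insert_fresh _ (fun kv => kv.1) (fun kv => pyAPatterns minsup kv)
      PySem.Dict.empty (fun a _ => PySem.Dict.contains_empty _)
      (by simpa [PySem.Dict.keys] using PySem.Dict.nodup_keys_ofList cpb)]
  simp [patterns_eq, PySem.Dict.empty]
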